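-- pv_equiv track=rewrite | github.com/Youyu-eyes/codeforces-classification | 代码模版/数据结构/monotonic stack.py | nearestGreater
-- ===== SOURCE A (Python) =====
-- from typing import List, Tuple
--
-- def nearestGreater(nums: List[int]) -> Tuple[List[int], List[int]]:
--     n = len(nums)
--     # left[i] 是 nums[i] 左侧最近的严格大于 nums[i] 的数的下标，若不存在则为 -1
--     left = [-1] * n
--     st = []
--     for i, x in enumerate(nums):
--         while st and nums[st[-1]] <= x:  # 如果求严格小于，改成 >=
--             st.pop()
--         if st:
--             left[i] = st[-1]
--         st.append(i)
--
--     # right[i] 是 nums[i] 右侧最近的严格大于 nums[i] 的数的下标，若不存在则为 n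
--     right = [n] * n
--     st = []
--     for i in range(n - 1, -1, -1):
--         x = nums[i]
--         while st and nums[st[-1]] <= x:  # 如果求严格小于，改成 >=
--             st.pop()
--         if st:
--             right[i] = st[-1]
--         st.append(i)
--
--     return left, right
-- ===== SOURCE B (Python) =====
-- from typing import List, Tuple
--
-- def nearestGreater(nums: List[int]) -> Tuple[List[int], List[int]]:
--     # Stack-free: for each i, scan directly outward until a strictly greater element.
--     n = len(nums)
--     left = []
--     for i, x in enumerate(nums):
--         p = i - 1
--         while p >= 0 and nums[p] <= x:
--             p -= 1
--         left.append(p)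
--     right = []
--     for i, x in enumerate(nums):
--         p = i + 1
--         while p < n and nums[p] <= x:
--             p += 1
--         right.append(p)
--     return left, right
-- ===== Notes on version B (the rewrite author's own statement) =====
-- stated objective: simpler
-- what changed: Replaces the two monotonic-stack passes with a stack-free direct scan: for each index, walk left (resp. right) until the first strictly greater element.
import Mathlib
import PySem

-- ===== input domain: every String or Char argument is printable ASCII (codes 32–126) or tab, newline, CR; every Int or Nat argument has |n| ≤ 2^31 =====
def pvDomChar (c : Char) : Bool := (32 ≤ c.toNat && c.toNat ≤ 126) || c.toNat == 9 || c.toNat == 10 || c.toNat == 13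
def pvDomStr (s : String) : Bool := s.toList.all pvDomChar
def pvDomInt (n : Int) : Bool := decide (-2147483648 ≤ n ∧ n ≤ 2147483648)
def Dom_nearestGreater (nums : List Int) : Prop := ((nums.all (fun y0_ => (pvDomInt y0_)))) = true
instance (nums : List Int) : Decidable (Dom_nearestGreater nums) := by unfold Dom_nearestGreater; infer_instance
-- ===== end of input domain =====

-- B replaces the two monotonic-stack passes with a plain outward scan per index (no stack); same values, O(n^2) worst case.

-- ===== PORT A =====
-- the inner `while st and nums[st[-1]] <= x: st.pop()` loop (stack kept top-first;
-- indices on the stack are always in range, so getD is exact for nums[st[-1]])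
def popLe (nums : List Int) (x : Int) : List Nat → List Nat
  | [] => []
  | t :: rest => if nums.getD t 0 ≤ x then popLe nums x rest else t :: rest

-- the first `for i, x in enumerate(nums)` loop: left[i] is produced in index order
def aLeft (nums : List Int) : List Nat → List Nat → List Int
  | [], _ => []
  | i :: rest, st =>
      let st' := popLe nums (nums.getD i 0) st
      let v : Int := match st' with | [] => -1 | t :: _ => (t : Int)
      v :: aLeft nums rest (i :: st')

-- the second loop, `for i in range(n-1, -1, -1)`: results are consed so right comes out in index order
def aRight (nums : List Int) : List Nat → List Nat → List Int → List Int
  | [], _, acc => acc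
  | i :: rest, st, acc =>
      let st' := popLe nums (nums.getD i 0) st
      let v : Int := match st' with | [] => (nums.length : Int) | t :: _ => (t : Int)
      aRight nums rest (i :: st') (v :: acc)

def nearestGreater (nums : List Int) : List Int × List Int :=
  (aLeft nums (List.range nums.length) [],
   aRight nums (List.range nums.length).reverse [] [])

-- ===== PORT B =====
-- `p = i - 1; while p >= 0 and nums[p] <= x: p -= 1` (argument is p+1, so 0 means p = -1)
def findLeft (nums : List Int) (x : Int) : Nat → Int
  | 0 => -1
  | p + 1 => if nums.getD p 0 ≤ x then findLeft nums x p else (p : Int)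

-- `p = i + 1; while p < n and nums[p] <= x: p += 1`
def findRight (nums : List Int) (x : Int) (p : Nat) : Int :=
  if _h : p < nums.length then
    if nums.getD p 0 ≤ x then findRight nums x (p + 1) else (p : Int)
  else (nums.length : Int)
termination_by nums.length - p

def nearestGreater_alt (nums : List Int) : List Int × List Int :=
  ((List.range nums.length).map (fun i => findLeft nums (nums.getD i 0) i),
   (List.range nums.length).map (fun i => findRight nums (nums.getD i 0) (i + 1)))

-- ===== PRECONDITION & SPEC =====
def Spec_nearestGreater (nums : List Int) (out : List Int × List Int) : Prop := out = nearestGreater_alt nums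
instance (nums : List Int) (out : List Int × List Int) : Decidable (Spec_nearestGreater nums out) := by unfold Spec_nearestGreater; infer_instance

-- ===== CLAIM (what is proved, stated in full; the proofs are below) =====
def Claim_equal_nearestGreater : Prop := ∀ (nums : List Int), Dom_nearestGreater nums → Spec_nearestGreater nums (nearestGreater nums)

-- ===== LEMMAS AND PROOFS =====

-- the stack state of A's left pass after processing indices 0..i-1
def stkL (nums : List Int) : Nat → List Nat
  | 0 => []
  | i + 1 => i :: popLe nums (nums.getD i 0) (stkL nums i)

-- the stack state of A's right pass after processing indices n-1 down to i
def stkR (nums : List Int) (i : Nat) : List Nat :=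
  if _h : i < nums.length then i :: popLe nums (nums.getD i 0) (stkR nums (i + 1)) else []
termination_by nums.length - i

theorem popLe_popLe (nums : List Int) {x y : Int} (h : y ≤ x) :
    ∀ st : List Nat, popLe nums x (popLe nums y st) = popLe nums x st := by
  intro st
  induction st with
  | nil => rfl
  | cons t rest ih =>
      show popLe nums x (if nums.getD t 0 ≤ y then popLe nums y rest else t :: rest)
           = if nums.getD t 0 ≤ x then popLe nums x rest else t :: rest
      by_cases ht : nums.getD t 0 ≤ y
      · rw [if_pos ht, if_pos (ht.trans h), ih]
      · rw [if_neg ht]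
        rfl

theorem keyL (nums : List Int) (x : Int) :
    ∀ i : Nat, (match popLe nums x (stkL nums i) with
                | [] => (-1 : Int) | t :: _ => (t : Int)) = findLeft nums x i := by
  intro i
  induction i with
  | zero => rfl
  | succ p ih =>
      show (match (if nums.getD p 0 ≤ x then popLe nums x (popLe nums (nums.getD p 0) (stkL nums p))
                   else p :: popLe nums (nums.getD p 0) (stkL nums p)) with
            | [] => (-1 : Int) | t :: _ => (t : Int))
           = if nums.getD p 0 ≤ x then findLeft nums x p else (p : Int)
      by_cases hp : nums.getD p 0 ≤ x
      · rw [if_pos hp, if_pos hp, popLe_popLe nums hp]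
        exact ih
      · rw [if_neg hp, if_neg hp]

theorem keyR (nums : List Int) (x : Int) :
    ∀ i : Nat, (match popLe nums x (stkR nums i) with
                | [] => (nums.length : Int) | t :: _ => (t : Int)) = findRight nums x i := by
  intro i
  induction i using stkR.induct nums with
  | case1 i hi ih =>
      rw [stkR, dif_pos hi, findRight, dif_pos hi]
      show (match (if nums.getD i 0 ≤ x then popLe nums x (popLe nums (nums.getD i 0) (stkR nums (i + 1)))
                   else i :: popLe nums (nums.getD i 0) (stkR nums (i + 1))) with
            | [] => (nums.length : Int) | t :: _ => (t : Int))
           = if nums.getD i 0 ≤ x then findRight nums x (i + 1) else (i : Int)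
      by_cases hp : nums.getD i 0 ≤ x
      · rw [if_pos hp, if_pos hp, popLe_popLe nums hp]
        exact ih
      · rw [if_neg hp, if_neg hp]
  | case2 i hi =>
      rw [stkR, dif_neg hi, findRight, dif_neg hi]
      rfl

theorem aLeft_run (nums : List Int) :
    ∀ (k i : Nat), aLeft nums (List.range' i k) (stkL nums i)
      = (List.range' i k).map (fun j => findLeft nums (nums.getD j 0) j) := by
  intro k
  induction k with
  | zero => intro i; rfl
  | succ k ih =>
      intro i
      rw [List.range'_succ]
      show (match popLe nums (nums.getD i 0) (stkL nums i) with
            | [] => (-1 : Int) | t :: _ => (t : Int))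
           :: aLeft nums (List.range' (i + 1) k)
                (i :: popLe nums (nums.getD i 0) (stkL nums i)) = _
      rw [keyL nums (nums.getD i 0) i]
      have hstk : i :: popLe nums (nums.getD i 0) (stkL nums i) = stkL nums (i + 1) := rfl
      rw [hstk, ih (i + 1), List.map_cons]

theorem aRight_run (nums : List Int) :
    ∀ (k i : Nat) (acc : List Int), i + k ≤ nums.length →
      aRight nums (List.range' i k).reverse (stkR nums (i + k)) acc
      = (List.range' i k).map (fun j => findRight nums (nums.getD j 0) (j + 1)) ++ acc := by
  intro k
  induction k with
  | zero => intro i acc _; rfl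
  | succ k ih =>
      intro i acc hik
      have hlt : i + k < nums.length := by omega
      rw [List.range'_concat, one_mul, List.reverse_append, List.reverse_singleton,
          List.singleton_append]
      show aRight nums (List.range' i k).reverse
            ((i + k) :: popLe nums (nums.getD (i + k) 0) (stkR nums (i + k + 1)))
            ((match popLe nums (nums.getD (i + k) 0) (stkR nums (i + k + 1)) with
              | [] => (nums.length : Int) | t :: _ => (t : Int)) :: acc) = _
      rw [keyR nums (nums.getD (i + k) 0) (i + k + 1)]
      have hstk : stkR nums (i + k)
          = (i + k) :: popLe nums (nums.getD (i + k) 0) (stkR nums (i + k + 1)) := by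
        rw [stkR, dif_pos hlt]
      rw [← hstk, ih i _ (by omega), List.map_append, List.map_singleton, List.append_assoc,
          List.singleton_append]

-- ===== VERDICT (by name: the statement is the Claim_ definition above) =====
theorem nearestGreater_spec : Claim_equal_nearestGreater := by
  intro nums _
  unfold Spec_nearestGreater nearestGreater nearestGreater_alt
  have hR : stkR nums nums.length = [] := by rw [stkR, dif_neg (by omega)]
  have h1 : aLeft nums (List.range nums.length) []
      = (List.range nums.length).map (fun j => findLeft nums (nums.getD j 0) j) := by
    rw [List.range_eq_range']
    exact aLeft_run nums nums.length 0
  have h2 : aRight nums (List.range nums.length).reverse [] []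
      = (List.range nums.length).map (fun j => findRight nums (nums.getD j 0) (j + 1)) := by
    rw [List.range_eq_range']
    have := aRight_run nums nums.length 0 [] (by omega)
    rw [Nat.zero_add] at this
    rw [hR] at this
    rw [this, List.append_nil]
  rw [h1, h2]
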